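-- pv_equiv track=rewrite | github.com/k-sriram/advent-of-code | 2024/day23.py | bigger_cluster
-- ===== SOURCE A (Python) =====
-- def bigger_cluster(cluster: list[tuple[str, ...]]) -> list[tuple[str, ...]]:
--     new_cluster = []
--     for i, clus0 in enumerate(cluster):
--         for clus1 in cluster[i + 1 :]:
--             if clus1[:-1] != clus0[:-1]:
--                 continue
--             n_clus = clus0 + (clus1[-1],)
--             if all(
--                 n_clus[:i] + n_clus[i + 1 :] in cluster
--                 for i in range(len(n_clus) - 3, -1, -1)
--             ):
--                 new_cluster.append(n_clus)
--     return new_cluster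
-- ===== SOURCE B (Python) =====
-- def bigger_cluster(cluster: list[tuple[str, ...]]) -> list[tuple[str, ...]]:
--     # One right-to-left pass: a dict maps each shared prefix to the lasts of the
--     # elements already seen (i.e. those to the right), so the O(n) prefix scan and
--     # the O(n) list-membership test of the original disappear; the sub-clique
--     # prefixes ("bases") are precomputed once per element, the check is memoised
--     # per distinct last, and with no bases the chunk is a plain comprehension.
--     members = set(cluster)
--     suffix = {}  # prefix -> lasts of later elements, most recent LAST
--     chunks = []
--     for clus in reversed(cluster):
--         key = clus[:-1]
--         lasts = suffix.get(key)
--         if lasts is None: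
--             lasts = []
--             suffix[key] = lasts
--         bases = [clus[:q] + clus[q + 1 :] for q in range(len(clus) - 2, -1, -1)]
--         rev = reversed(lasts)
--         if bases:
--             chunk = []
--             append = chunk.append
--             checked = {}
--             for last1 in rev:
--                 ok = checked.get(last1)
--                 if ok is None:
--                     ok = True
--                     t = (last1,)
--                     for base in bases:
--                         if base + t not in members:
--                             ok = False
--                             break
--                     checked[last1] = ok
--                 if ok:
--                     append(clus + (last1,))
--         else:
--             chunk = [clus + (last1,) for last1 in rev]
--         chunks.append(chunk)
--         lasts.append(clus[-1])
--     return [n for chunk in reversed(chunks) for n in chunk]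
-- ===== Notes on version B (the rewrite author's own statement) =====
-- stated objective: faster
-- what changed: Replaced the quadratic pair scan with list membership by a single right-to-left pass that groups candidate lasts per shared prefix in a dict and checks sub-clique membership in a set, emitting each element's chunk and concatenating the chunks in original order.
-- outside the precondition, e.g. on bigger_cluster([()]): A returns [], B raises IndexError; on bigger_cluster([(), ('a',)]): A returns [('a',)], B raises IndexError
import Mathlib
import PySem

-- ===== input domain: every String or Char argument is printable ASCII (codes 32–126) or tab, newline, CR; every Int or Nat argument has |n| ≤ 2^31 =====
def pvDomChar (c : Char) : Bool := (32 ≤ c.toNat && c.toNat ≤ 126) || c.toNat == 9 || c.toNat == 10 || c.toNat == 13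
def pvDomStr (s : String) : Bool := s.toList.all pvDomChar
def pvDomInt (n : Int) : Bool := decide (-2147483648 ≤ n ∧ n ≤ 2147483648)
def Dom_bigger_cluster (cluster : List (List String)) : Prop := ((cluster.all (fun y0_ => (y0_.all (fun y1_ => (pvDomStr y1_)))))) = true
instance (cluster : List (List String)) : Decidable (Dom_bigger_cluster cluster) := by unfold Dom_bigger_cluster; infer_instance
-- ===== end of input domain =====

-- B replaces A's quadratic pair scan (with list membership) by one right-to-left pass
-- grouping candidate lasts per shared prefix in a dict, with set membership: faster (measured).


-- ===== PORT A =====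
def bigger_cluster (cluster : List (List String)) : List (List String) :=
  (PySem.List.enumerate cluster 0).foldl
    (fun new_cluster ic =>
      (PySem.List.slice cluster (some (ic.1 + 1)) none).foldl
        (fun acc clus1 =>
          if PySem.List.slice clus1 none (some (-1)) ≠ PySem.List.slice ic.2 none (some (-1)) then
            acc
          else
            let n_clus := ic.2 ++ [PySem.List.pyGetD clus1 (-1) ""]
            if (PySem.List.pyRange ((n_clus.length : Int) - 3) (-1) (-1)).all
                 (fun q => decide ((PySem.List.slice n_clus none (some q) ++
                                    PySem.List.slice n_clus (some (q + 1)) none) ∈ cluster))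
            then acc ++ [n_clus] else acc)
        new_cluster)
    []

-- ===== PORT B =====
def bigger_cluster_alt (cluster : List (List String)) : List (List String) :=
  let members : PySem.Set (List String) := PySem.Set.ofList cluster
  let st :=
    cluster.reverse.foldl
      (fun (st : PySem.Dict (List String) (List String) × List (List (List String))) clus =>
        let key := PySem.List.slice clus none (some (-1))
        let lasts := st.1.getD key []
        let bases := (PySem.List.pyRange ((clus.length : Int) - 2) (-1) (-1)).map
          (fun q => PySem.List.slice clus none (some q) ++ PySem.List.slice clus (some (q + 1)) none)
        let chunk :=
          if bases.isEmpty then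
            lasts.reverse.map (fun last1 => clus ++ [last1])
          else
            -- the checked-dict memoises the for/else membership loop per distinct last
            (lasts.reverse.foldl
              (fun (cst : PySem.Dict String Bool × List (List String)) last1 =>
                match cst.1.get? last1 with
                | some ok => (cst.1, if ok then cst.2 ++ [clus ++ [last1]] else cst.2)
                | none =>
                  let ok := bases.all (fun base => PySem.Set.contains members (base ++ [last1]))
                  (cst.1.insert last1 ok, if ok then cst.2 ++ [clus ++ [last1]] else cst.2))
              (PySem.Dict.empty, [])).2
        (st.1.insert key (lasts ++ [PySem.List.pyGetD clus (-1) ""]), st.2 ++ [chunk]))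
      (PySem.Dict.empty, [])
  st.2.reverse.flatten

-- ===== PRECONDITION & SPEC =====
-- Pre_ excludes clusters containing the empty tuple: there Python A either raises
-- IndexError (clus1[-1]) or returns via an accidental prefix match of () with a
-- 1-tuple's prefix, and B's last-element extraction raises IndexError.
def Pre_bigger_cluster (cluster : List (List String)) : Prop := [] ∉ cluster
instance (cluster : List (List String)) : Decidable (Pre_bigger_cluster cluster) := by unfold Pre_bigger_cluster; infer_instance
def pvWitness_bigger_cluster : List (List String) := [["a", "b"], ["a", "c"], ["a", "b"], ["b", "c"]]

def Spec_bigger_cluster (cluster : List (List String)) (out : List (List String)) : Prop := out = bigger_cluster_alt cluster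
instance (cluster : List (List String)) (out : List (List String)) : Decidable (Spec_bigger_cluster cluster out) := by unfold Spec_bigger_cluster; infer_instance

-- ===== CLAIM (what is proved, stated in full; the proofs are below) =====
def Claim_equal_bigger_cluster : Prop := ∀ (cluster : List (List String)), Dom_bigger_cluster cluster → Pre_bigger_cluster cluster → Spec_bigger_cluster cluster (bigger_cluster cluster)


-- ===== LEMMAS AND PROOFS =====

-- last element with Python's default-"" reading (both ports use pyGetD · (-1) "")
def pvLastD (c : List String) : String := PySem.List.pyGetD c (-1) ""

-- the shared sub-clique membership check, membership taken in the fixed list `mem`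
def pvChk (mem : List (List String)) (n : List String) : Bool :=
  (PySem.List.pyRange ((n.length : Int) - 3) (-1) (-1)).all
    (fun q => decide ((PySem.List.slice n none (some q) ++
                       PySem.List.slice n (some (q + 1)) none) ∈ mem))

-- what one outer-loop step of A contributes for head c over the tail cs
def pvInner (mem : List (List String)) (c : List String) (cs : List (List String)) : List (List String) :=
  (cs.filter (fun c1 => pvChk mem (c ++ [pvLastD c1]) && decide (c1.dropLast = c.dropLast))).map
    (fun c1 => c ++ [pvLastD c1])

def pvPairs (mem : List (List String)) : List (List String) → List (List String)
  | [] => []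
  | c :: cs => pvInner mem c cs ++ pvPairs mem cs

theorem pvcontains (xs : List (List String)) (x : List String) :
    PySem.Set.contains (PySem.Set.ofList xs) x = decide (x ∈ xs) := by
  by_cases h : x ∈ xs <;>
    simp [PySem.Set.contains_eq_listContains, List.contains_eq_mem, PySem.Set.mem_ofList, h]


theorem pvBases (mem : List (List String)) (c : List String) (l : String) :
    (((PySem.List.pyRange ((c.length : Int) - 2) (-1) (-1)).map
        (fun q => PySem.List.slice c none (some q) ++ PySem.List.slice c (some (q + 1)) none)).all
      (fun base => PySem.Set.contains (PySem.Set.ofList mem) (base ++ [l])))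
    = pvChk mem (c ++ [l]) := by
  unfold pvChk
  rw [show (((c ++ [l]).length : Int)) - 3 = (c.length : Int) - 2 from by
    push_cast [List.length_append, List.length_cons, List.length_nil]; ring]
  rw [List.all_map, List.all_eq_not_any_not, List.all_eq_not_any_not]
  congr 1
  apply PySem.List.any_congr_mem
  intro q hq
  simp only [Function.comp_apply]
  rw [PySem.List.mem_pyRange_neg_one] at hq
  have h0 : (0 : Int) ≤ q := by omega
  have h1 : (0 : Int) ≤ q + 1 := by omega
  have ht : q.toNat ≤ c.length := by omega
  have hd : (q + 1).toNat ≤ c.length := by omega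
  rw [pvcontains, PySem.List.slice_to c h0, PySem.List.slice_to (c ++ [l]) h0,
      PySem.List.slice_from c h1, PySem.List.slice_from (c ++ [l]) h1,
      List.take_append_of_le_length ht, List.drop_append_of_le_length hd, List.append_assoc]

theorem pvA_inner (mem : List (List String)) (c : List String) (cs : List (List String))
    (acc : List (List String)) :
    cs.foldl
      (fun acc clus1 =>
        if PySem.List.slice clus1 none (some (-1)) ≠ PySem.List.slice c none (some (-1)) then
          acc
        else
          let n_clus := c ++ [PySem.List.pyGetD clus1 (-1) ""]
          if (PySem.List.pyRange ((n_clus.length : Int) - 3) (-1) (-1)).all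
               (fun q => decide ((PySem.List.slice n_clus none (some q) ++
                                  PySem.List.slice n_clus (some (q + 1)) none) ∈ mem))
          then acc ++ [n_clus] else acc)
      acc = acc ++ pvInner mem c cs := by
  have hb : (fun (acc : List (List String)) (clus1 : List String) =>
        if PySem.List.slice clus1 none (some (-1)) ≠ PySem.List.slice c none (some (-1)) then
          acc
        else
          let n_clus := c ++ [PySem.List.pyGetD clus1 (-1) ""]
          if (PySem.List.pyRange ((n_clus.length : Int) - 3) (-1) (-1)).all
               (fun q => decide ((PySem.List.slice n_clus none (some q) ++
                                  PySem.List.slice n_clus (some (q + 1)) none) ∈ mem))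
          then acc ++ [n_clus] else acc)
      = (fun acc c1 =>
          if pvChk mem (c ++ [pvLastD c1]) && decide (c1.dropLast = c.dropLast) then
            acc ++ [(fun c1 => c ++ [pvLastD c1]) c1] else acc) := by
    funext a x
    simp only [PySem.List.slice_to_neg_one, pvChk, pvLastD]
    by_cases h1 : x.dropLast = c.dropLast <;> simp [h1]
  rw [hb, PySem.List.foldl_append_if]
  rfl

theorem pvA_outer (mem : List (List String)) (suf : List (List String)) :
    ∀ (pre : List (List String)) (acc : List (List String)), mem = pre ++ suf →
    (PySem.List.enumerate suf (pre.length : Int)).foldl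
      (fun new_cluster ic =>
        (PySem.List.slice mem (some (ic.1 + 1)) none).foldl
          (fun acc clus1 =>
            if PySem.List.slice clus1 none (some (-1)) ≠ PySem.List.slice ic.2 none (some (-1)) then
              acc
            else
              let n_clus := ic.2 ++ [PySem.List.pyGetD clus1 (-1) ""]
              if (PySem.List.pyRange ((n_clus.length : Int) - 3) (-1) (-1)).all
                   (fun q => decide ((PySem.List.slice n_clus none (some q) ++
                                      PySem.List.slice n_clus (some (q + 1)) none) ∈ mem))
              then acc ++ [n_clus] else acc)
          new_cluster)
      acc = acc ++ pvPairs mem suf := by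
  induction suf with
  | nil => intro pre acc h; simp [PySem.List.enumerate_nil, pvPairs]
  | cons c cs ih =>
    intro pre acc h
    rw [PySem.List.enumerate_cons, List.foldl_cons]
    dsimp only
    have h1 : ((pre.length : Int) + 1) = ((pre.length + 1 : Nat) : Int) := by push_cast; ring
    rw [h1, PySem.List.slice_from_natCast]
    have h2 : mem.drop (pre.length + 1) = cs := by
      subst h
      rw [show pre ++ c :: cs = (pre ++ [c]) ++ cs by simp,
          show pre.length + 1 = (pre ++ [c]).length by simp, List.drop_left]
    rw [h2, pvA_inner]
    have h3 := ih (pre ++ [c]) (acc ++ pvInner mem c cs) (by simp [h])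
    have h4 : (((pre ++ [c]).length : Nat) : Int) = ((pre.length + 1 : Nat) : Int) := by simp
    rw [h4] at h3
    rw [pvPairs, ← List.append_assoc]
    exact h3

theorem pvA_eq (cluster : List (List String)) :
    bigger_cluster cluster = pvPairs cluster cluster := by
  have h := pvA_outer cluster cluster [] [] rfl
  unfold bigger_cluster
  simpa using h

theorem pvChunk (mem : List (List String)) (c : List String) (cs : List (List String)) :
    ((((cs.filter (fun c1 => decide (c1.dropLast = c.dropLast))).map pvLastD).filter
        (fun l => pvChk mem (c ++ [l]))).map (fun l => c ++ [l])) = pvInner mem c cs := by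
  unfold pvInner
  rw [List.filter_map, List.map_map, List.filter_filter]
  rfl

-- the memoised inner loop equals the plain filtered emit, whenever every memo entry is truthful
theorem pvMemo (c : List String) (p : String → Bool) (L : List String) :
    ∀ (d : PySem.Dict String Bool) (acc : List (List String)),
      (∀ k b, d.get? k = some b → b = p k) →
      (L.foldl
        (fun (cst : PySem.Dict String Bool × List (List String)) last1 =>
          match cst.1.get? last1 with
          | some ok => (cst.1, if ok then cst.2 ++ [c ++ [last1]] else cst.2)
          | none =>
            (cst.1.insert last1 (p last1),
             if p last1 then cst.2 ++ [c ++ [last1]] else cst.2))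
        (d, acc)).2 = acc ++ (L.filter p).map (fun l => c ++ [l]) := by
  induction L with
  | nil => intro d acc _; simp
  | cons l L ih =>
    intro d acc hinv
    rw [List.foldl_cons]
    cases h : d.get? l with
    | some b =>
      have hb : b = p l := hinv l b h
      rw [ih d _ hinv, List.filter_cons]
      by_cases hp : p l = true
      · simp [hb, hp]
      · simp [hb, hp]
    | none =>
      have hinv' : ∀ k b, (d.insert l (p l)).get? k = some b → b = p k := by
        intro k b hk
        rw [PySem.Dict.get?_insert] at hk
        by_cases hkl : k = l
        · rw [if_pos hkl] at hk; cases hk; rw [hkl]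
        · rw [if_neg hkl] at hk; exact hinv k b hk
      rw [ih (d.insert l (p l)) _ hinv', List.filter_cons]
      by_cases hp : p l = true
      · simp [hp]
      · simp [hp]

theorem pvB_fold (mem : List (List String)) (cs : List (List String)) :
    (∀ key : List String,
      ((cs.reverse.foldl
        (fun (st : PySem.Dict (List String) (List String) × List (List (List String))) clus =>
          let key := PySem.List.slice clus none (some (-1))
          let lasts := st.1.getD key []
          let bases := (PySem.List.pyRange ((clus.length : Int) - 2) (-1) (-1)).map
            (fun q => PySem.List.slice clus none (some q) ++ PySem.List.slice clus (some (q + 1)) none)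
          let chunk :=
            if bases.isEmpty then
              lasts.reverse.map (fun last1 => clus ++ [last1])
            else
              (lasts.reverse.foldl
                (fun (cst : PySem.Dict String Bool × List (List String)) last1 =>
                  match cst.1.get? last1 with
                  | some ok => (cst.1, if ok then cst.2 ++ [clus ++ [last1]] else cst.2)
                  | none =>
                    let ok := bases.all (fun base => PySem.Set.contains (PySem.Set.ofList mem) (base ++ [last1]))
                    (cst.1.insert last1 ok, if ok then cst.2 ++ [clus ++ [last1]] else cst.2))
                (PySem.Dict.empty, [])).2
          (st.1.insert key (lasts ++ [PySem.List.pyGetD clus (-1) ""]), st.2 ++ [chunk]))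
        (PySem.Dict.empty, [])).1.getD key [])
        = ((cs.filter (fun c1 => decide (c1.dropLast = key))).map pvLastD).reverse)
    ∧ (cs.reverse.foldl
        (fun (st : PySem.Dict (List String) (List String) × List (List (List String))) clus =>
          let key := PySem.List.slice clus none (some (-1))
          let lasts := st.1.getD key []
          let bases := (PySem.List.pyRange ((clus.length : Int) - 2) (-1) (-1)).map
            (fun q => PySem.List.slice clus none (some q) ++ PySem.List.slice clus (some (q + 1)) none)
          let chunk :=
            if bases.isEmpty then
              lasts.reverse.map (fun last1 => clus ++ [last1])
            else
              (lasts.reverse.foldl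
                (fun (cst : PySem.Dict String Bool × List (List String)) last1 =>
                  match cst.1.get? last1 with
                  | some ok => (cst.1, if ok then cst.2 ++ [clus ++ [last1]] else cst.2)
                  | none =>
                    let ok := bases.all (fun base => PySem.Set.contains (PySem.Set.ofList mem) (base ++ [last1]))
                    (cst.1.insert last1 ok, if ok then cst.2 ++ [clus ++ [last1]] else cst.2))
                (PySem.Dict.empty, [])).2
          (st.1.insert key (lasts ++ [PySem.List.pyGetD clus (-1) ""]), st.2 ++ [chunk]))
        (PySem.Dict.empty, [])).2.reverse.flatten = pvPairs mem cs := by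
  induction cs with
  | nil =>
    constructor
    · intro key; simp [PySem.Dict.getD_empty]
    · simp [pvPairs]
  | cons c cs ih =>
    obtain ⟨ih1, ih2⟩ := ih
    dsimp only at ih1 ih2
    simp only [PySem.List.slice_to_neg_one] at ih1 ih2
    have hrev : (c :: cs).reverse = cs.reverse ++ [c] := by simp
    rw [hrev, List.foldl_append, List.foldl_cons, List.foldl_nil]
    dsimp only
    simp only [PySem.List.slice_to_neg_one]
    rw [ih1 c.dropLast, List.reverse_reverse]
    have hch :
        (if (((PySem.List.pyRange ((c.length : Int) - 2) (-1) (-1)).map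
                (fun q => PySem.List.slice c none (some q) ++
                          PySem.List.slice c (some (q + 1)) none))).isEmpty then
          ((cs.filter (fun c1 => decide (c1.dropLast = c.dropLast))).map pvLastD).map
            (fun last1 => c ++ [last1])
        else
          (((cs.filter (fun c1 => decide (c1.dropLast = c.dropLast))).map pvLastD).foldl
            (fun (cst : PySem.Dict String Bool × List (List String)) last1 =>
              match cst.1.get? last1 with
              | some ok => (cst.1, if ok then cst.2 ++ [c ++ [last1]] else cst.2)
              | none =>
                let ok := (((PySem.List.pyRange ((c.length : Int) - 2) (-1) (-1)).map
                    (fun q => PySem.List.slice c none (some q) ++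
                              PySem.List.slice c (some (q + 1)) none))).all
                  (fun base => PySem.Set.contains (PySem.Set.ofList mem) (base ++ [last1]))
                (cst.1.insert last1 ok, if ok then cst.2 ++ [c ++ [last1]] else cst.2))
            (PySem.Dict.empty, [])).2) = pvInner mem c cs := by
      by_cases hE : (((PySem.List.pyRange ((c.length : Int) - 2) (-1) (-1)).map
          (fun q => PySem.List.slice c none (some q) ++
                    PySem.List.slice c (some (q + 1)) none))).isEmpty
      · rw [if_pos hE]
        have hr : PySem.List.pyRange ((c.length : Int) - 2) (-1) (-1) = [] := by
          simpa [List.isEmpty_iff, List.map_eq_nil_iff] using hE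
        have hp : ∀ l : String, pvChk mem (c ++ [l]) = true := by
          intro l
          unfold pvChk
          rw [show (((c ++ [l]).length : Int)) - 3 = (c.length : Int) - 2 from by
            push_cast [List.length_append, List.length_cons, List.length_nil]; ring, hr]
          rfl
        unfold pvInner
        rw [show (fun c1 => pvChk mem (c ++ [pvLastD c1]) && decide (c1.dropLast = c.dropLast))
              = (fun c1 : List String => decide (c1.dropLast = c.dropLast)) from by
            funext a; simp [hp], List.map_map]
        rfl
      · rw [if_neg hE]
        have hb : (fun (cst : PySem.Dict String Bool × List (List String)) last1 =>
              match cst.1.get? last1 with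
              | some ok => (cst.1, if ok then cst.2 ++ [c ++ [last1]] else cst.2)
              | none =>
                let ok := (((PySem.List.pyRange ((c.length : Int) - 2) (-1) (-1)).map
                    (fun q => PySem.List.slice c none (some q) ++
                              PySem.List.slice c (some (q + 1)) none))).all
                  (fun base => PySem.Set.contains (PySem.Set.ofList mem) (base ++ [last1]))
                (cst.1.insert last1 ok, if ok then cst.2 ++ [c ++ [last1]] else cst.2))
            = (fun (cst : PySem.Dict String Bool × List (List String)) last1 =>
              match cst.1.get? last1 with
              | some ok => (cst.1, if ok then cst.2 ++ [c ++ [last1]] else cst.2)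
              | none =>
                (cst.1.insert last1 (pvChk mem (c ++ [last1])),
                 if pvChk mem (c ++ [last1]) then cst.2 ++ [c ++ [last1]] else cst.2)) := by
          funext cst l
          cases h : cst.1.get? l
          · simp only [pvBases]
          · rfl
        rw [hb, pvMemo c (fun l => pvChk mem (c ++ [l]))
              ((cs.filter (fun c1 => decide (c1.dropLast = c.dropLast))).map pvLastD)
              PySem.Dict.empty [] (by intro k b hk; simp [PySem.Dict.get?_empty] at hk),
            List.nil_append, pvChunk]
    rw [hch]
    constructor
    · intro key
      rw [PySem.Dict.getD_insert]
      by_cases hk : key = c.dropLast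
      · subst hk
        simp [pvLastD]
      · rw [if_neg hk, ih1 key]
        simp [show ¬(c.dropLast = key) from fun h => hk h.symm]
    · simp only [List.reverse_append, List.reverse_cons, List.reverse_nil, List.nil_append,
        List.singleton_append, List.flatten_cons]
      rw [ih2, pvPairs]

theorem pvB_eq (cluster : List (List String)) :
    bigger_cluster_alt cluster = pvPairs cluster cluster := by
  have h := (pvB_fold cluster cluster).2
  unfold bigger_cluster_alt
  exact h

-- ===== VERDICT (by name: the statement is the Claim_ definition above) =====
theorem bigger_cluster_spec : Claim_equal_bigger_cluster := by
  intro cluster _ _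
  unfold Spec_bigger_cluster
  rw [pvA_eq, pvB_eq]
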